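-- pv_equiv track=rewrite | github.com/copperdogma/doc-web | modules/enrich/sequence_order_v1/main.py | _should_prepend_mechanics
-- ===== SOURCE A (Python) =====
-- from typing import Any, Dict, List, Optional, Tuple
--
-- def _should_prepend_mechanics(raw_html: str, mechanics_events: List[Dict[str, Any]]) -> bool:
--     if not raw_html or not mechanics_events:
--         return False
--     lower = raw_html.lower()
--     first_anchor = lower.find("<a")
--     hint_positions = []
--     for pattern in (
--         "roll",
--         "test your",
--         "test the",
--         "dice",
--         "die",
--         "combat",
--         "fight",
--         "attack",
--         "lose",
--         "gain",
--         "reduce",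
--         "increase",
--         "add",
--         "subtract",
--         "stamina",
--         "skill",
--         "luck",
--         "find",
--         "possessions",
--     ):
--         idx = lower.find(pattern)
--         if idx != -1:
--             hint_positions.append(idx)
--     if not hint_positions:
--         return False
--     stat_hint = min(hint_positions)
--     if first_anchor == -1:
--         return True
--     return stat_hint < first_anchor
-- ===== SOURCE B (Python) =====
-- def _should_prepend_mechanics(raw_html, mechanics_events):
--     if not raw_html or not mechanics_events:
--         return False
--     patterns = (
--         "roll", "test your", "test the", "dice", "die", "combat", "fight",
--         "attack", "lose", "gain", "reduce", "increase", "add", "subtract",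
--         "stamina", "skill", "luck", "find", "possessions",
--     )
--     lower = raw_html.lower()
--     first_anchor = lower.find("<a")
--     # single left-to-right scan: first position where any keyword starts
--     stat_hint = next(
--         (i for i in range(len(lower)) if any(lower.startswith(p, i) for p in patterns)),
--         None,
--     )
--     if stat_hint is None:
--         return False
--     return first_anchor == -1 or stat_hint < first_anchor
-- ===== Notes on version B (the rewrite author's own statement) =====
-- stated objective: alternative
-- what changed: A makes 19 pattern-major str.find scans of the whole page and then takes the min of the collected positions; B makes a single position-major left-to-right scan that stops at the first index where any keyword starts (no position list, no min).
import Mathlib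
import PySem

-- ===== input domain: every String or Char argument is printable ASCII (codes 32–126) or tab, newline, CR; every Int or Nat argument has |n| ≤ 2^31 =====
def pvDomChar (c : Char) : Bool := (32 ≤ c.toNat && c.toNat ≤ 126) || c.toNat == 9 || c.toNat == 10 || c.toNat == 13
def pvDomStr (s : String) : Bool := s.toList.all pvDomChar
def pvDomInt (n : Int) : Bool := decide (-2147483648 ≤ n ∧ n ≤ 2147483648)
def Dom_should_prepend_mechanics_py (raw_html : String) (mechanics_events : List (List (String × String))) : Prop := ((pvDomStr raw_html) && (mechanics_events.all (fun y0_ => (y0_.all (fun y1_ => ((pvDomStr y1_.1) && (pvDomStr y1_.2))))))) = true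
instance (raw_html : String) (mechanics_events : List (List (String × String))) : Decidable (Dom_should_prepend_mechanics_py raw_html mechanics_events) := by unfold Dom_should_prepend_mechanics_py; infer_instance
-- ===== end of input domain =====

-- B replaces A's 19 pattern-major `str.find` scans of the page by ONE position-major
-- left-to-right scan that stops at the first index where any keyword starts (objective: alternative).

-- the keyword tuple, shared verbatim by both Pythons
def pvPatterns : List (List Char) :=
  ["roll".toList, "test your".toList, "test the".toList, "dice".toList, "die".toList,
   "combat".toList, "fight".toList, "attack".toList, "lose".toList, "gain".toList,
   "reduce".toList, "increase".toList, "add".toList, "subtract".toList, "stamina".toList,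
   "skill".toList, "luck".toList, "find".toList, "possessions".toList]

-- ===== PORT A =====
def should_prepend_mechanics_py (raw_html : String) (mechanics_events : List (List (String × String))) : Bool :=
  if raw_html = "" ∨ mechanics_events = [] then false
  else
    let lower := PySem.Chars.lower raw_html.toList
    let first_anchor := PySem.Chars.find lower "<a".toList
    let hint_positions := pvPatterns.foldl (fun acc pattern =>
        let idx := PySem.Chars.find lower pattern
        if idx ≠ -1 then acc ++ [idx] else acc) []
    if hint_positions = [] then false
    else
      match PySem.List.min? hint_positions id with
      | none => false  -- unreachable: hint_positions ≠ [] (Python's min would raise only on [])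
      | some stat_hint => if first_anchor = -1 then true else decide (stat_hint < first_anchor)

-- ===== PORT B =====
-- first index i (scanning 0,1,2,…) at which some keyword starts; none if no position matches
def pvFirstHit : List Char → Option Nat
  | [] => none
  | c :: rest =>
    if pvPatterns.any (fun p => PySem.Chars.startswith (c :: rest) p) then some 0
    else (pvFirstHit rest).map (· + 1)

def should_prepend_mechanics_py_alt (raw_html : String) (mechanics_events : List (List (String × String))) : Bool :=
  if raw_html = "" ∨ mechanics_events = [] then false
  else
    let lower := PySem.Chars.lower raw_html.toList
    let first_anchor := PySem.Chars.find lower "<a".toList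
    match pvFirstHit lower with
    | none => false
    | some stat_hint => first_anchor == -1 || decide ((stat_hint : Int) < first_anchor)

-- ===== PRECONDITION & SPEC =====
def Spec_should_prepend_mechanics_py (raw_html : String) (mechanics_events : List (List (String × String))) (out : Bool) : Prop := out = should_prepend_mechanics_py_alt raw_html mechanics_events
instance (raw_html : String) (mechanics_events : List (List (String × String))) (out : Bool) : Decidable (Spec_should_prepend_mechanics_py raw_html mechanics_events out) := by unfold Spec_should_prepend_mechanics_py; infer_instance

-- ===== CLAIM (what is proved, stated in full; the proofs are below) =====
def Claim_equal_should_prepend_mechanics_py : Prop := ∀ (raw_html : String) (mechanics_events : List (List (String × String))), Dom_should_prepend_mechanics_py raw_html mechanics_events → Spec_should_prepend_mechanics_py raw_html mechanics_events (should_prepend_mechanics_py raw_html mechanics_events)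

-- ===== LEMMAS AND PROOFS =====

-- "some keyword starts at position i of cs"
def pvHit (cs : List Char) (i : Nat) : Prop := ∃ p ∈ pvPatterns, p <+: cs.drop i

-- every keyword is nonempty
theorem pvPatterns_ne_nil : ∀ p ∈ pvPatterns, p ≠ [] := by decide

theorem pvHit_zero (cs : List Char) :
    (pvPatterns.any (fun p => PySem.Chars.startswith cs p) = true) ↔ pvHit cs 0 := by
  simp [List.any_eq_true, PySem.Chars.startswith_iff, pvHit]

theorem pvHit_succ (c : Char) (rest : List Char) (i : Nat) :
    pvHit (c :: rest) (i + 1) ↔ pvHit rest i := by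
  simp [pvHit]

theorem pvFirstHit_none (cs : List Char) :
    pvFirstHit cs = none ↔ ∀ i, ¬ pvHit cs i := by
  induction cs with
  | nil =>
    simp only [pvFirstHit, true_iff]
    intro i ⟨p, hp, hpre⟩
    exact pvPatterns_ne_nil p hp (List.prefix_nil.mp (by simpa using hpre))
  | cons c rest ih =>
    rw [pvFirstHit]
    by_cases h : pvPatterns.any (fun p => PySem.Chars.startswith (c :: rest) p) = true
    · simp only [h]
      constructor
      · intro hn; exact absurd hn (by simp)
      · intro hall; exact absurd ((pvHit_zero _).mp h) (hall 0)
    · simp only [if_neg h, Option.map_eq_none_iff, ih]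
      constructor
      · intro hall i
        cases i with
        | zero => exact fun hh => h ((pvHit_zero _).mpr hh)
        | succ j => exact fun hh => hall j ((pvHit_succ c rest j).mp hh)
      · intro hall j hh
        exact hall (j + 1) ((pvHit_succ c rest j).mpr hh)

theorem pvFirstHit_some (cs : List Char) (k : Nat) (h : pvFirstHit cs = some k) :
    pvHit cs k ∧ ∀ j < k, ¬ pvHit cs j := by
  induction cs generalizing k with
  | nil => simp [pvFirstHit] at h
  | cons c rest ih =>
    rw [pvFirstHit] at h
    by_cases ha : pvPatterns.any (fun p => PySem.Chars.startswith (c :: rest) p) = true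
    · rw [if_pos ha] at h
      simp only [Option.some.injEq] at h
      subst h
      exact ⟨(pvHit_zero _).mp ha, by omega⟩
    · simp only [if_neg ha, Option.map_eq_some_iff] at h
      obtain ⟨k', hk', rfl⟩ := h
      obtain ⟨hhit, hmin⟩ := ih k' hk'
      refine ⟨(pvHit_succ c rest k').mpr hhit, ?_⟩
      intro j hj
      cases j with
      | zero => exact fun hh => ha ((pvHit_zero _).mpr hh)
      | succ j' => exact fun hh => hmin j' (by omega) ((pvHit_succ c rest j').mp hh)

-- A's accumulated list is the filtered/mapped list of finds
theorem pvHints_eq (lower : List Char) :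
    pvPatterns.foldl (fun acc pattern =>
        let idx := PySem.Chars.find lower pattern
        if idx ≠ -1 then acc ++ [idx] else acc) []
      = ((pvPatterns.filter (fun p => PySem.Chars.find lower p ≠ -1)).map
          (fun p => PySem.Chars.find lower p)) := by
  have := PySem.List.foldl_append_if
      (fun p => decide (PySem.Chars.find lower p ≠ -1))
      (fun p => PySem.Chars.find lower p) pvPatterns []
  simpa using this

-- the minimum of the recorded finds is the least hit position
theorem pvMin_spec (lower : List Char) (m : Int)
    (hmem : m ∈ (pvPatterns.filter (fun p => PySem.Chars.find lower p ≠ -1)).map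
          (fun p => PySem.Chars.find lower p))
    (hmin : ∀ x ∈ (pvPatterns.filter (fun p => PySem.Chars.find lower p ≠ -1)).map
          (fun p => PySem.Chars.find lower p), m ≤ x) :
    0 ≤ m ∧ pvHit lower m.toNat ∧ ∀ j < m.toNat, ¬ pvHit lower j := by
  obtain ⟨p, hpf, rfl⟩ := List.mem_map.mp hmem
  obtain ⟨hpmem, hpne⟩ := List.mem_filter.mp hpf
  have hne : PySem.Chars.find lower p ≠ -1 := by simpa using hpne
  have h0 : 0 ≤ PySem.Chars.find lower p := by
    have h1 := PySem.Chars.neg_one_le_find lower p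
    omega
  obtain ⟨hpre, _⟩ := PySem.Chars.find_spec h0
  refine ⟨h0, ⟨p, hpmem, hpre⟩, ?_⟩
  intro j hj ⟨q, hq, hqpre⟩
  have hqinf : q <:+: lower :=
    (PySem.Chars.isIn_iff_infix q lower).mp
      ((PySem.Chars.exists_prefix_drop_iff_isIn q lower).mp ⟨j, hqpre⟩)
  have hq0 : 0 ≤ PySem.Chars.find lower q := (PySem.Chars.find_nonneg_iff lower q).mpr hqinf
  have hqfilter : q ∈ pvPatterns.filter (fun p => PySem.Chars.find lower p ≠ -1) := by
    refine List.mem_filter.mpr ⟨hq, ?_⟩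
    simp only [ne_eq, decide_not, Bool.not_eq_eq_eq_not, Bool.not_true, decide_eq_false_iff_not]
    omega
  have hle : PySem.Chars.find lower p ≤ PySem.Chars.find lower q :=
    hmin _ (List.mem_map.mpr ⟨q, hqfilter, rfl⟩)
  exact (PySem.Chars.find_spec hq0).2 j (by omega) hqpre

theorem pvNoHints_iff (lower : List Char) :
    (pvPatterns.filter (fun p => PySem.Chars.find lower p ≠ -1)).map
        (fun p => PySem.Chars.find lower p) = [] ↔ ∀ i, ¬ pvHit lower i := by
  rw [List.map_eq_nil_iff, List.filter_eq_nil_iff]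
  constructor
  · intro h i ⟨p, hp, hpre⟩
    have hfind : PySem.Chars.find lower p = -1 := by
      have := h p hp; simpa using this
    have hinf : p <:+: lower :=
      (PySem.Chars.isIn_iff_infix p lower).mp
        ((PySem.Chars.exists_prefix_drop_iff_isIn p lower).mp ⟨i, hpre⟩)
    exact (PySem.Chars.find_eq_neg_one_iff lower p).mp hfind hinf
  · intro h p hp
    have hfind : PySem.Chars.find lower p = -1 := by
      rw [PySem.Chars.find_eq_neg_one_iff]
      intro hinf
      obtain ⟨j, hpre⟩ :=
        (PySem.Chars.exists_prefix_drop_iff_isIn p lower).mpr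
          ((PySem.Chars.isIn_iff_infix p lower).mpr hinf)
      exact h j ⟨p, hp, hpre⟩
    simp [hfind]

-- ===== VERDICT (by name: the statement is the Claim_ definition above) =====
theorem should_prepend_mechanics_py_spec : Claim_equal_should_prepend_mechanics_py := by
  intro raw_html mechanics_events _
  unfold Spec_should_prepend_mechanics_py should_prepend_mechanics_py should_prepend_mechanics_py_alt
  by_cases hg : raw_html = "" ∨ mechanics_events = []
  · simp [hg]
  · simp only [if_neg hg]
    set lower := PySem.Chars.lower raw_html.toList with hlow
    set fa := PySem.Chars.find lower "<a".toList with hfa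
    rw [pvHints_eq lower]
    set hints := (pvPatterns.filter (fun p => PySem.Chars.find lower p ≠ -1)).map
          (fun p => PySem.Chars.find lower p) with hhints
    by_cases he : hints = []
    · -- no pattern occurs: both sides false
      have hnone : pvFirstHit lower = none :=
        (pvFirstHit_none lower).mpr ((pvNoHints_iff lower).mp (hhints ▸ he))
      simp [he, hnone]
    · simp only [if_neg he]
      cases hm : PySem.List.min? hints id with
      | none => exact absurd ((PySem.List.min?_eq_none_iff hints id).mp hm) he
      | some m =>
        have hmem := PySem.List.min?_mem hm
        have hmin : ∀ x ∈ hints, m ≤ x := fun x hx => PySem.List.min?_isMin hm x hx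
        obtain ⟨hm0, hhit, hleast⟩ := pvMin_spec lower m (hhints ▸ hmem) (hhints ▸ hmin)
        -- pvFirstHit lower = some m.toNat
        cases hfh : pvFirstHit lower with
        | none =>
          exact absurd hhit ((pvFirstHit_none lower).mp hfh m.toNat)
        | some k =>
          obtain ⟨hhitk, hleastk⟩ := pvFirstHit_some lower k hfh
          have hk : k = m.toNat := by
            rcases Nat.lt_trichotomy k m.toNat with h | h | h
            · exact absurd hhitk (hleast k h)
            · exact h
            · exact absurd hhit (hleastk m.toNat h)
          subst hk
          have hcast : (m.toNat : Int) = m := Int.toNat_of_nonneg hm0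
          by_cases hfa1 : fa = -1
          · simp [hfa1]
          · simp [hfa1, hcast]
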